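-- pv_equiv track=rewrite | github.com/michaelhu88/MommyNature | backend/google_places.py | _guess_location_type
-- ===== SOURCE A (Python) =====
-- from typing import Dict, List, Optional
--
-- def _guess_location_type(location_name: str) -> Optional[str]:
--     """Guess the type of location based on name keywords"""
--     name_lower = location_name.lower()
--
--     if any(word in name_lower for word in ['park', 'preserve', 'reserve']):
--         return 'park'
--     elif any(word in name_lower for word in ['trail', 'hike', 'hiking']):
--         return 'hiking trail'
--     elif any(word in name_lower for word in ['beach', 'shore', 'coast']):
--         return 'beach'
--     elif any(word in name_lower for word in ['mountain', 'mount', 'mt', 'peak']):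
--         return 'mountain'
--     elif any(word in name_lower for word in ['lake', 'pond', 'reservoir']):
--         return 'lake'
--     elif any(word in name_lower for word in ['waterfall', 'falls']):
--         return 'waterfall'
--     elif any(word in name_lower for word in ['viewpoint', 'overlook', 'vista']):
--         return 'scenic viewpoint'
--     else:
--         return 'tourist attraction'
-- ===== SOURCE B (Python) =====
-- # B: position-driven scan -- walk the lowered name once and, at each index, try every
-- # keyword as a prefix there, keeping the minimum rule rank seen (instead of A's
-- # per-keyword substring searches in an if-elif chain).
-- _LABELS = ['park', 'hiking trail', 'beach', 'mountain', 'lake', 'waterfall',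
--            'scenic viewpoint', 'tourist attraction']
-- _KEYWORDS = [('park', 0), ('preserve', 0), ('reserve', 0),
--              ('trail', 1), ('hike', 1), ('hiking', 1),
--              ('beach', 2), ('shore', 2), ('coast', 2),
--              ('mountain', 3), ('mount', 3), ('mt', 3), ('peak', 3),
--              ('lake', 4), ('pond', 4), ('reservoir', 4),
--              ('waterfall', 5), ('falls', 5),
--              ('viewpoint', 6), ('overlook', 6), ('vista', 6)]
--
-- def _guess_location_type(location_name: str):
--     s = location_name.lower()
--     best = len(_LABELS) - 1          # index of the default label
--     for i in range(len(s)):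
--         for kw, rank in _KEYWORDS:
--             if rank < best and s.startswith(kw, i):
--                 best = rank
--     return _LABELS[best]
-- ===== Notes on version B (the rewrite author's own statement) =====
-- stated objective: alternative
-- what changed: Replaced the if-elif chain of per-keyword substring searches by a single position-driven scan of the lowered name that tries every keyword as a prefix at each index and keeps the minimum rule rank, indexing into a label table at the end.
import Mathlib
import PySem

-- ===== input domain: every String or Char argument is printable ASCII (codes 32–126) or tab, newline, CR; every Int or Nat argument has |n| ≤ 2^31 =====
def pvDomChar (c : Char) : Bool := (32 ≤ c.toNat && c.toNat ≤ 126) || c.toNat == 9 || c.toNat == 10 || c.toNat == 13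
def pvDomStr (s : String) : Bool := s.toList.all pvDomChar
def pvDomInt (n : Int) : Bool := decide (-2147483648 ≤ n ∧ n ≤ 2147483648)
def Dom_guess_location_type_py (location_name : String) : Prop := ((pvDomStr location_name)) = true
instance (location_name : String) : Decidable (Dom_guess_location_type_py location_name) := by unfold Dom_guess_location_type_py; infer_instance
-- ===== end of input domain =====

-- B scans the lowered name position by position, matching every keyword as a prefix there and
-- keeping the minimum rule rank, instead of A's per-keyword substring searches in an if-elif
-- chain (objective: alternative).

-- ===== PORT A =====
def guess_location_type_py (location_name : String) : Option String :=
  let name_lower := PySem.Str.lower location_name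
  if ["park", "preserve", "reserve"].any (fun w => PySem.Str.isIn w name_lower) then
    some "park"
  else if ["trail", "hike", "hiking"].any (fun w => PySem.Str.isIn w name_lower) then
    some "hiking trail"
  else if ["beach", "shore", "coast"].any (fun w => PySem.Str.isIn w name_lower) then
    some "beach"
  else if ["mountain", "mount", "mt", "peak"].any (fun w => PySem.Str.isIn w name_lower) then
    some "mountain"
  else if ["lake", "pond", "reservoir"].any (fun w => PySem.Str.isIn w name_lower) then
    some "lake"
  else if ["waterfall", "falls"].any (fun w => PySem.Str.isIn w name_lower) then
    some "waterfall"
  else if ["viewpoint", "overlook", "vista"].any (fun w => PySem.Str.isIn w name_lower) then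
    some "scenic viewpoint"
  else
    some "tourist attraction"

-- ===== PORT B =====
def pvLabels : List String :=
  ["park", "hiking trail", "beach", "mountain", "lake", "waterfall",
   "scenic viewpoint", "tourist attraction"]

def pvKW : List (List Char × Nat) :=
  [("park".toList, 0), ("preserve".toList, 0), ("reserve".toList, 0),
   ("trail".toList, 1), ("hike".toList, 1), ("hiking".toList, 1),
   ("beach".toList, 2), ("shore".toList, 2), ("coast".toList, 2),
   ("mountain".toList, 3), ("mount".toList, 3), ("mt".toList, 3), ("peak".toList, 3),
   ("lake".toList, 4), ("pond".toList, 4), ("reservoir".toList, 4),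
   ("waterfall".toList, 5), ("falls".toList, 5),
   ("viewpoint".toList, 6), ("overlook".toList, 6), ("vista".toList, 6)]

-- inner loop of Source B (one position i, all keywords); Python's s.startswith(kw, i) with a
-- natural index i is exactly "kw is a prefix of t.drop i", ported with PySem.Chars.startswith
def pvStep (t : List Char) (b : Nat) (i : Nat) : Nat :=
  pvKW.foldl (fun b kr => if kr.2 < b ∧ PySem.Chars.startswith (t.drop i) kr.1 then kr.2 else b) b

def guess_location_type_py_alt (location_name : String) : Option String :=
  let t := (PySem.Str.lower location_name).toList
  -- for i in range(len(s)): ported as List.range t.length (natural indices 0..len-1, exact)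
  let best := (List.range t.length).foldl (pvStep t) (pvLabels.length - 1)
  -- _LABELS[best]: best never exceeds its initial value 7 = len(_LABELS)-1, so getD is exact
  some (pvLabels.getD best "")

-- ===== PRECONDITION & SPEC =====
def Spec_guess_location_type_py (location_name : String) (out : Option String) : Prop := out = guess_location_type_py_alt location_name
instance (location_name : String) (out : Option String) : Decidable (Spec_guess_location_type_py location_name out) := by unfold Spec_guess_location_type_py; infer_instance

-- ===== CLAIM (what is proved, stated in full; the proofs are below) =====
def Claim_equal_guess_location_type_py : Prop := ∀ (location_name : String), Dom_guess_location_type_py location_name → Spec_guess_location_type_py location_name (guess_location_type_py location_name)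

-- ===== LEMMAS AND PROOFS =====

-- inner fold: result is ≤ the init, is the init or the rank of a keyword matching at i,
-- and is ≤ the rank of every keyword matching at i
lemma pv_inner_spec (t : List Char) (i : Nat) (l : List (List Char × Nat)) (b : Nat) :
    l.foldl (fun b kr => if kr.2 < b ∧ PySem.Chars.startswith (t.drop i) kr.1 then kr.2 else b) b ≤ b ∧
    (l.foldl (fun b kr => if kr.2 < b ∧ PySem.Chars.startswith (t.drop i) kr.1 then kr.2 else b) b = b ∨
      ∃ kr ∈ l, kr.1 <+: t.drop i ∧
        l.foldl (fun b kr => if kr.2 < b ∧ PySem.Chars.startswith (t.drop i) kr.1 then kr.2 else b) b = kr.2) ∧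
    (∀ kr ∈ l, kr.1 <+: t.drop i →
      l.foldl (fun b kr => if kr.2 < b ∧ PySem.Chars.startswith (t.drop i) kr.1 then kr.2 else b) b ≤ kr.2) := by
  induction l generalizing b with
  | nil => simp
  | cons kr0 l ih =>
    simp only [List.foldl_cons]
    by_cases hc : kr0.2 < b ∧ PySem.Chars.startswith (t.drop i) kr0.1 = true
    · rw [if_pos hc]
      obtain ⟨ih1, ih2, ih3⟩ := ih kr0.2
      refine ⟨le_trans ih1 (Nat.le_of_lt hc.1), ?_, ?_⟩
      · rcases ih2 with h | ⟨kr, hm, hp, he⟩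
        · exact Or.inr ⟨kr0, List.mem_cons_self .., (PySem.Chars.startswith_iff _ _).mp hc.2, h⟩
        · exact Or.inr ⟨kr, List.mem_cons_of_mem _ hm, hp, he⟩
      · intro kr hm hp
        rcases List.mem_cons.mp hm with h | h
        · subst h; exact ih1
        · exact ih3 kr h hp
    · rw [if_neg hc]
      obtain ⟨ih1, ih2, ih3⟩ := ih b
      refine ⟨ih1, ?_, ?_⟩
      · rcases ih2 with h | ⟨kr, hm, hp, he⟩
        · exact Or.inl h
        · exact Or.inr ⟨kr, List.mem_cons_of_mem _ hm, hp, he⟩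
      · intro kr hm hp
        rcases List.mem_cons.mp hm with h | h
        · subst h
          have hsw : PySem.Chars.startswith (t.drop i) kr.1 = true :=
            (PySem.Chars.startswith_iff _ _).mpr hp
          have hnb : ¬ kr.2 < b := fun hlt => hc ⟨hlt, hsw⟩
          exact le_trans ih1 (by omega)
        · exact ih3 kr h hp

-- outer fold over a list of positions
lemma pv_outer_spec (t : List Char) (P : List Nat) (b : Nat) :
    P.foldl (pvStep t) b ≤ b ∧
    (P.foldl (pvStep t) b = b ∨
      ∃ kr ∈ pvKW, (∃ i ∈ P, kr.1 <+: t.drop i) ∧ P.foldl (pvStep t) b = kr.2) ∧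
    (∀ kr ∈ pvKW, ∀ i ∈ P, kr.1 <+: t.drop i → P.foldl (pvStep t) b ≤ kr.2) := by
  induction P generalizing b with
  | nil => simp
  | cons i P ih =>
    simp only [List.foldl_cons]
    obtain ⟨in1, in2, in3⟩ := pv_inner_spec t i pvKW b
    obtain ⟨ih1, ih2, ih3⟩ := ih (pvStep t b i)
    have hstep : pvStep t b i =
        pvKW.foldl (fun b kr => if kr.2 < b ∧ PySem.Chars.startswith (t.drop i) kr.1 then kr.2 else b) b := rfl
    rw [← hstep] at in1 in2 in3
    refine ⟨le_trans ih1 in1, ?_, ?_⟩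
    · rcases ih2 with h | ⟨kr, hm, ⟨j, hj, hp⟩, he⟩
      · rw [h]
        rcases in2 with h' | ⟨kr, hm, hp, he⟩
        · exact Or.inl h'
        · exact Or.inr ⟨kr, hm, ⟨i, List.mem_cons_self .., hp⟩, he⟩
      · exact Or.inr ⟨kr, hm, ⟨j, List.mem_cons_of_mem _ hj, hp⟩, he⟩
    · intro kr hm j hj hp
      rcases List.mem_cons.mp hj with h | h
      · subst h; exact le_trans ih1 (in3 kr hm hp)
      · exact ih3 kr hm j h hp

-- a nonempty keyword is a prefix at some index < length iff it is a substring
lemma pv_occ_iff (t kw : List Char) (hne : kw ≠ []) :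
    (∃ i ∈ List.range t.length, kw <+: t.drop i) ↔ PySem.Chars.isIn kw t = true := by
  rw [← PySem.Chars.exists_prefix_drop_iff_isIn]
  constructor
  · rintro ⟨i, _, hp⟩; exact ⟨i, hp⟩
  · rintro ⟨j, hp⟩
    by_cases hj : j < t.length
    · exact ⟨j, List.mem_range.mpr hj, hp⟩
    · exfalso
      have hd : t.drop j = [] := List.drop_eq_nil_of_le (by omega)
      rw [hd] at hp
      exact hne (List.prefix_nil.mp hp)

-- the whole comparison, on the lowered character list
set_option maxHeartbeats 2000000 in
lemma pv_main (t : List Char) :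
    (if ["park", "preserve", "reserve"].any (fun w => PySem.Chars.isIn w.toList t) then
      some "park"
    else if ["trail", "hike", "hiking"].any (fun w => PySem.Chars.isIn w.toList t) then
      some "hiking trail"
    else if ["beach", "shore", "coast"].any (fun w => PySem.Chars.isIn w.toList t) then
      some "beach"
    else if ["mountain", "mount", "mt", "peak"].any (fun w => PySem.Chars.isIn w.toList t) then
      some "mountain"
    else if ["lake", "pond", "reservoir"].any (fun w => PySem.Chars.isIn w.toList t) then
      some "lake"
    else if ["waterfall", "falls"].any (fun w => PySem.Chars.isIn w.toList t) then
      some "waterfall"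
    else if ["viewpoint", "overlook", "vista"].any (fun w => PySem.Chars.isIn w.toList t) then
      some "scenic viewpoint"
    else
      some "tourist attraction") =
    some (pvLabels.getD ((List.range t.length).foldl (pvStep t) (pvLabels.length - 1)) "") := by
  obtain ⟨h1, h2, h3⟩ := pv_outer_spec t (List.range t.length) (pvLabels.length - 1)
  set R := (List.range t.length).foldl (pvStep t) (pvLabels.length - 1) with hR
  have hne : ∀ kr ∈ pvKW, kr.1 ≠ [] := by decide
  have H3 : ∀ kr ∈ pvKW, PySem.Chars.isIn kr.1 t = true → R ≤ kr.2 := by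
    intro kr hm hin
    obtain ⟨i, hi, hp⟩ := (pv_occ_iff t kr.1 (hne kr hm)).mpr hin
    exact h3 kr hm i hi hp
  have H1 : R = 7 ∨ ∃ kr ∈ pvKW, PySem.Chars.isIn kr.1 t = true ∧ R = kr.2 := by
    rcases h2 with h | ⟨kr, hm, ⟨i, hi, hp⟩, he⟩
    · exact Or.inl h
    · exact Or.inr ⟨kr, hm, (pv_occ_iff t kr.1 (hne kr hm)).mp ⟨i, hi, hp⟩, he⟩
  have h7 : R ≤ 7 := h1
  have W : ∀ kw r, (kw, r) ∈ pvKW → PySem.Chars.isIn kw t = true → R ≤ r :=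
    fun kw r hm hin => H3 (kw, r) hm hin
  clear h1 h2 h3 hne hR
  simp only [List.any_cons, List.any_nil, Bool.or_false, Bool.or_eq_true]
  split_ifs with g0 g1 g2 g3 g4 g5 g6
  · have hle : R ≤ 0 := by
      rcases g0 with h | h | h
      exacts [W _ _ (by decide) h, W _ _ (by decide) h, W _ _ (by decide) h]
    rcases H1 with h | ⟨⟨kw, r'⟩, hm, hin, he⟩
    · omega
    · simp only [pvKW, List.mem_cons, Prod.mk.injEq, List.not_mem_nil, or_false] at hm
      rcases hm with ⟨rfl, rfl⟩ | ⟨rfl, rfl⟩ | ⟨rfl, rfl⟩ | ⟨rfl, rfl⟩ | ⟨rfl, rfl⟩ | ⟨rfl, rfl⟩ | ⟨rfl, rfl⟩ | ⟨rfl, rfl⟩ | ⟨rfl, rfl⟩ | ⟨rfl, rfl⟩ | ⟨rfl, rfl⟩ | ⟨rfl, rfl⟩ | ⟨rfl, rfl⟩ | ⟨rfl, rfl⟩ | ⟨rfl, rfl⟩ | ⟨rfl, rfl⟩ | ⟨rfl, rfl⟩ | ⟨rfl, rfl⟩ | ⟨rfl, rfl⟩ | ⟨rfl, rfl⟩ |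 ⟨rfl, rfl⟩ <;>
        first | omega | (rw [he]; rfl)
  · have hle : R ≤ 1 := by
      rcases g1 with h | h | h
      exacts [W _ _ (by decide) h, W _ _ (by decide) h, W _ _ (by decide) h]
    rcases H1 with h | ⟨⟨kw, r'⟩, hm, hin, he⟩
    · omega
    · simp only [pvKW, List.mem_cons, Prod.mk.injEq, List.not_mem_nil, or_false] at hm
      rcases hm with ⟨rfl, rfl⟩ | ⟨rfl, rfl⟩ | ⟨rfl, rfl⟩ | ⟨rfl, rfl⟩ | ⟨rfl, rfl⟩ | ⟨rfl, rfl⟩ | ⟨rfl, rfl⟩ | ⟨rfl, rfl⟩ | ⟨rfl, rfl⟩ | ⟨rfl, rfl⟩ | ⟨rfl, rfl⟩ | ⟨rfl, rfl⟩ | ⟨rfl, rfl⟩ | ⟨rfl, rfl⟩ | ⟨rfl, rfl⟩ | ⟨rfl, rfl⟩ | ⟨rfl, rfl⟩ | ⟨rfl, rfl⟩ | ⟨rfl, rfl⟩ | ⟨rfl, rfl⟩ | ⟨rfl, rfl⟩ <;>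
        first | omega | (rw [he]; rfl) | simp_all
  · have hle : R ≤ 2 := by
      rcases g2 with h | h | h
      exacts [W _ _ (by decide) h, W _ _ (by decide) h, W _ _ (by decide) h]
    rcases H1 with h | ⟨⟨kw, r'⟩, hm, hin, he⟩
    · omega
    · simp only [pvKW, List.mem_cons, Prod.mk.injEq, List.not_mem_nil, or_false] at hm
      rcases hm with ⟨rfl, rfl⟩ | ⟨rfl, rfl⟩ | ⟨rfl, rfl⟩ | ⟨rfl, rfl⟩ | ⟨rfl, rfl⟩ | ⟨rfl, rfl⟩ | ⟨rfl, rfl⟩ | ⟨rfl, rfl⟩ | ⟨rfl, rfl⟩ | ⟨rfl, rfl⟩ | ⟨rfl, rfl⟩ | ⟨rfl, rfl⟩ | ⟨rfl, rfl⟩ | ⟨rfl, rfl⟩ | ⟨rfl, rfl⟩ | ⟨rfl, rfl⟩ | ⟨rfl, rfl⟩ | ⟨rfl, rfl⟩ | ⟨rfl, rfl⟩ | ⟨rfl, rfl⟩ | ⟨rfl, rfl⟩ <;>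
        first | omega | (rw [he]; rfl) | simp_all
  · have hle : R ≤ 3 := by
      rcases g3 with h | h | h | h
      exacts [W _ _ (by decide) h, W _ _ (by decide) h, W _ _ (by decide) h, W _ _ (by decide) h]
    rcases H1 with h | ⟨⟨kw, r'⟩, hm, hin, he⟩
    · omega
    · simp only [pvKW, List.mem_cons, Prod.mk.injEq, List.not_mem_nil, or_false] at hm
      rcases hm with ⟨rfl, rfl⟩ | ⟨rfl, rfl⟩ | ⟨rfl, rfl⟩ | ⟨rfl, rfl⟩ | ⟨rfl, rfl⟩ | ⟨rfl, rfl⟩ | ⟨rfl, rfl⟩ | ⟨rfl, rfl⟩ | ⟨rfl, rfl⟩ | ⟨rfl, rfl⟩ | ⟨rfl, rfl⟩ | ⟨rfl, rfl⟩ | ⟨rfl, rfl⟩ | ⟨rfl, rfl⟩ | ⟨rfl, rfl⟩ | ⟨rfl, rfl⟩ | ⟨rfl, rfl⟩ | ⟨rfl, rfl⟩ | ⟨rfl, rfl⟩ | ⟨rfl, rfl⟩ | ⟨rfl, rfl⟩ <;>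
        first | omega | (rw [he]; rfl) | simp_all
  · have hle : R ≤ 4 := by
      rcases g4 with h | h | h
      exacts [W _ _ (by decide) h, W _ _ (by decide) h, W _ _ (by decide) h]
    rcases H1 with h | ⟨⟨kw, r'⟩, hm, hin, he⟩
    · omega
    · simp only [pvKW, List.mem_cons, Prod.mk.injEq, List.not_mem_nil, or_false] at hm
      rcases hm with ⟨rfl, rfl⟩ | ⟨rfl, rfl⟩ | ⟨rfl, rfl⟩ | ⟨rfl, rfl⟩ | ⟨rfl, rfl⟩ | ⟨rfl, rfl⟩ | ⟨rfl, rfl⟩ | ⟨rfl, rfl⟩ | ⟨rfl, rfl⟩ | ⟨rfl, rfl⟩ | ⟨rfl, rfl⟩ | ⟨rfl, rfl⟩ | ⟨rfl, rfl⟩ | ⟨rfl, rfl⟩ | ⟨rfl, rfl⟩ | ⟨rfl, rfl⟩ | ⟨rfl, rfl⟩ | ⟨rfl, rfl⟩ | ⟨rfl, rfl⟩ | ⟨rfl, rfl⟩ | ⟨rfl, rfl⟩ <;>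
        first | omega | (rw [he]; rfl) | simp_all
  · have hle : R ≤ 5 := by
      rcases g5 with h | h
      exacts [W _ _ (by decide) h, W _ _ (by decide) h]
    rcases H1 with h | ⟨⟨kw, r'⟩, hm, hin, he⟩
    · omega
    · simp only [pvKW, List.mem_cons, Prod.mk.injEq, List.not_mem_nil, or_false] at hm
      rcases hm with ⟨rfl, rfl⟩ | ⟨rfl, rfl⟩ | ⟨rfl, rfl⟩ | ⟨rfl, rfl⟩ | ⟨rfl, rfl⟩ | ⟨rfl, rfl⟩ | ⟨rfl, rfl⟩ | ⟨rfl, rfl⟩ | ⟨rfl, rfl⟩ | ⟨rfl, rfl⟩ | ⟨rfl, rfl⟩ | ⟨rfl, rfl⟩ | ⟨rfl, rfl⟩ | ⟨rfl, rfl⟩ | ⟨rfl, rfl⟩ | ⟨rfl, rfl⟩ | ⟨rfl, rfl⟩ | ⟨rfl, rfl⟩ | ⟨rfl, rfl⟩ | ⟨rfl, rfl⟩ | ⟨rfl, rfl⟩ <;>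
        first | omega | (rw [he]; rfl) | simp_all
  · have hle : R ≤ 6 := by
      rcases g6 with h | h | h
      exacts [W _ _ (by decide) h, W _ _ (by decide) h, W _ _ (by decide) h]
    rcases H1 with h | ⟨⟨kw, r'⟩, hm, hin, he⟩
    · omega
    · simp only [pvKW, List.mem_cons, Prod.mk.injEq, List.not_mem_nil, or_false] at hm
      rcases hm with ⟨rfl, rfl⟩ | ⟨rfl, rfl⟩ | ⟨rfl, rfl⟩ | ⟨rfl, rfl⟩ | ⟨rfl, rfl⟩ | ⟨rfl, rfl⟩ | ⟨rfl, rfl⟩ | ⟨rfl, rfl⟩ | ⟨rfl, rfl⟩ | ⟨rfl, rfl⟩ | ⟨rfl, rfl⟩ | ⟨rfl, rfl⟩ | ⟨rfl, rfl⟩ | ⟨rfl, rfl⟩ | ⟨rfl, rfl⟩ | ⟨rfl, rfl⟩ | ⟨rfl, rfl⟩ | ⟨rfl, rfl⟩ | ⟨rfl, rfl⟩ | ⟨rfl, rfl⟩ | ⟨rfl, rfl⟩ <;>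
        first | omega | (rw [he]; rfl) | simp_all
  · rcases H1 with h | ⟨⟨kw, r'⟩, hm, hin, he⟩
    · rw [h]; rfl
    · simp only [pvKW, List.mem_cons, Prod.mk.injEq, List.not_mem_nil, or_false] at hm
      rcases hm with ⟨rfl, rfl⟩ | ⟨rfl, rfl⟩ | ⟨rfl, rfl⟩ | ⟨rfl, rfl⟩ | ⟨rfl, rfl⟩ | ⟨rfl, rfl⟩ | ⟨rfl, rfl⟩ | ⟨rfl, rfl⟩ | ⟨rfl, rfl⟩ | ⟨rfl, rfl⟩ | ⟨rfl, rfl⟩ | ⟨rfl, rfl⟩ | ⟨rfl, rfl⟩ | ⟨rfl, rfl⟩ | ⟨rfl, rfl⟩ | ⟨rfl, rfl⟩ | ⟨rfl, rfl⟩ | ⟨rfl, rfl⟩ | ⟨rfl, rfl⟩ | ⟨rfl, rfl⟩ | ⟨rfl, rfl⟩ <;> simp_all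

-- ===== VERDICT (by name: the statement is the Claim_ definition above) =====
theorem guess_location_type_py_spec : Claim_equal_guess_location_type_py := by
  intro s _
  unfold Spec_guess_location_type_py guess_location_type_py guess_location_type_py_alt
  simp only [PySem.Str.isIn_eq]
  exact pv_main (PySem.Str.lower s).toList
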